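-- pv_equiv track=rewrite | github.com/adityabisoi/ds-algo-solutions | Algorithms/Strings/Gemstones/solution.py | gemstones
-- ===== SOURCE A (Python) =====
-- def gemstones(arr):
--     gem=set(arr[0])
--     l=len(arr)
--     if(l==1):
--         return len(gem)
--     for i in range(1,l):
--         #only the minerals common in all are gemstones
--         #so we find the intersection and return the length of intersection array
--         gem=gem.intersection(arr[i])
--     return len(gem)
-- ===== SOURCE B (Python) =====
-- def gemstones(arr):
--     # one pass: count in how many strings each distinct character occurs,
--     # then count the characters present in every string
--     counts = {}
--     for s in arr:
--         for c in set(s):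
--             counts[c] = counts.get(c, 0) + 1
--     return sum(1 for v in counts.values() if v == len(arr))
-- ===== Notes on version B (the rewrite author's own statement) =====
-- stated objective: alternative
-- what changed: Replaces the repeated set-intersection loop by a single frequency table: count for each distinct character how many strings contain it, then count characters whose frequency equals len(arr).
-- outside the precondition, e.g. on gemstones([]): A raises IndexError, B returns 0
import Mathlib
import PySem

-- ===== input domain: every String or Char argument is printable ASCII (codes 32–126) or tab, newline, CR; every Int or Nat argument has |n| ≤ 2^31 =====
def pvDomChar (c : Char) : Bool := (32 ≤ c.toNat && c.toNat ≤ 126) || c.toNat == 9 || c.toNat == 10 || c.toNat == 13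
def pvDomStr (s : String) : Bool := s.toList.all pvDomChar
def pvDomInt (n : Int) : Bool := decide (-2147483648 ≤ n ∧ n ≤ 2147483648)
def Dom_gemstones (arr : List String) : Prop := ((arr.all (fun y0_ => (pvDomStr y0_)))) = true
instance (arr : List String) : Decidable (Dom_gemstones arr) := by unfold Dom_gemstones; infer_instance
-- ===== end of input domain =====

-- B replaces A's repeated set intersections with one character-frequency table; same cost, different algorithm.

-- ===== PORT A =====
-- A: gem = set(arr[0]); if len(arr)==1 return len(gem); else intersect with each remaining string.
def gemstones (arr : List String) : Int :=
  match arr with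
  | [] => 0   -- unreachable under Pre_gemstones: Python's arr[0] raises IndexError here
  | a :: rest =>
    let gem : PySem.Set Char := PySem.Set.ofList a.toList
    if rest.length = 0 then PySem.Set.len gem
    else
      let gem2 := rest.foldl (fun g s => PySem.Set.inter g s.toList) gem
      PySem.Set.len gem2

-- ===== PORT B =====
-- B: counts[c] = number of strings whose distinct characters include c; answer = #{c | counts[c] = len(arr)}.
def gemstones_alt (arr : List String) : Int :=
  let counts : PySem.Dict Char Int :=
    arr.foldl (fun d s =>
      (PySem.Set.ofList s.toList).foldl (fun d c => d.insert c (d.getD c 0 + 1)) d)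
      PySem.Dict.empty
  (counts.values.map (fun v => if v == (arr.length : Int) then (1 : Int) else 0)).sum

-- ===== PRECONDITION & SPEC =====
-- Pre_ excludes only the empty list, on which Python A raises IndexError (arr[0]).
def Pre_gemstones (arr : List String) : Prop := arr ≠ []
instance (arr : List String) : Decidable (Pre_gemstones arr) := by unfold Pre_gemstones; infer_instance
def pvWitness_gemstones : List String := (["abc", "ab"])

def Spec_gemstones (arr : List String) (out : Int) : Prop := out = gemstones_alt arr
instance (arr : List String) (out : Int) : Decidable (Spec_gemstones arr out) := by unfold Spec_gemstones; infer_instance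

-- ===== CLAIM (what is proved, stated in full; the proofs are below) =====
def Claim_equal_gemstones : Prop := ∀ (arr : List String), Dom_gemstones arr → Pre_gemstones arr → Spec_gemstones arr (gemstones arr)

-- ===== LEMMAS AND PROOFS =====

-- A's intersection loop filters the first string's set by membership in every later string.
lemma interFold (rest : List String) (g : List Char) :
    rest.foldl (fun g s => PySem.Set.inter g s.toList) g
      = g.filter (fun c => rest.all (fun s => s.toList.contains c)) := by
  induction rest generalizing g with
  | nil => simp
  | cons s rest ih =>
    rw [List.foldl_cons, ih]
    simp only [PySem.Set.inter, List.filter_filter]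
    refine List.filter_congr fun c _ => ?_
    simp [List.all_cons, Bool.and_comm]

abbrev countStep : PySem.Dict Char Int → String → PySem.Dict Char Int := fun d s =>
  (PySem.Set.ofList s.toList).foldl (fun d c => d.insert c (d.getD c 0 + 1)) d

-- The value stored at c is the number of strings containing c.
lemma countsGetD (arr : List String) (d : PySem.Dict Char Int) (c : Char) :
    (arr.foldl countStep d).getD c 0
      = d.getD c 0 + (arr.countP (fun s => s.toList.contains c) : Int) := by
  induction arr generalizing d with
  | nil => simp
  | cons s arr ih =>
    simp only [List.foldl_cons, ih, countStep, PySem.Dict.getD_foldl_insert_add_one]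
    rw [List.Nodup.count (PySem.Set.nodup_ofList s.toList)]
    simp only [PySem.Set.mem_ofList, List.countP_cons]
    by_cases h : c ∈ s.toList
    · simp [h]; ring
    · simp [h]

lemma countsKeysNodup (arr : List String) (d : PySem.Dict Char Int) (h : d.keys.Nodup) :
    (arr.foldl countStep d).keys.Nodup := by
  induction arr generalizing d with
  | nil => exact h
  | cons s arr ih =>
    exact ih _ (PySem.Dict.nodup_keys_foldl_insert _ _ _ h)

lemma countsKeysMem (arr : List String) (d : PySem.Dict Char Int) (c : Char) :
    c ∈ (arr.foldl countStep d).keys ↔ c ∈ d.keys ∨ ∃ s ∈ arr, c ∈ s.toList := by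
  induction arr generalizing d with
  | nil => simp
  | cons s arr ih =>
    rw [List.foldl_cons, ih]
    simp only [countStep, PySem.Dict.keys_foldl_insert, PySem.Set.mem_update,
      PySem.Set.mem_ofList, List.mem_cons]
    constructor
    · intro h
      rcases h with h | h
      · rcases h with h | h
        · exact Or.inl h
        · exact Or.inr ⟨s, Or.inl rfl, h⟩
      · obtain ⟨t, ht, hc⟩ := h
        exact Or.inr ⟨t, Or.inr ht, hc⟩
    · intro h
      rcases h with h | h
      · exact Or.inl (Or.inl h)
      · obtain ⟨t, ht, hc⟩ := h
        rcases ht with ht | ht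
        · subst ht; exact Or.inl (Or.inr hc)
        · exact Or.inr ⟨t, ht, hc⟩

-- ===== VERDICT (by name: the statement is the Claim_ definition above) =====
theorem gemstones_spec : Claim_equal_gemstones := by
  intro arr _ hpre
  unfold Spec_gemstones
  match arr with
  | [] => exact absurd rfl hpre
  | a :: rest =>
    -- both sides count the distinct characters occurring in every string
    unfold gemstones gemstones_alt
    simp only []
    have hnodup : ((a :: rest).foldl countStep PySem.Dict.empty).keys.Nodup :=
      countsKeysNodup _ _ (by simp)
    rw [PySem.Dict.values_eq_map_keys _ hnodup 0, List.map_map]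
    have hsum :
        (((a :: rest).foldl countStep PySem.Dict.empty).keys.map
            (fun k => if ((a :: rest).foldl countStep PySem.Dict.empty).getD k 0 ==
                ((a :: rest).length : Int) then (1 : Int) else 0)).sum
          = (((a :: rest).foldl countStep PySem.Dict.empty).keys.countP
              (fun k => (a :: rest).all (fun s => s.toList.contains k)) : Int) := by
      rw [PySem.List.sum_map_ite_one_zero]
      congr 1
      apply List.countP_congr
      intro k _
      rw [countsGetD]
      simp only [PySem.Dict.getD_empty, zero_add, beq_iff_eq, List.length_cons]
      constructor
      · intro h
        have h' : List.countP (fun s => s.toList.contains k) (a :: rest) = (a :: rest).length := by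
          exact_mod_cast h
        rw [List.all_eq_true]
        exact fun x hx => List.countP_eq_length.1 h' x hx
      · intro h
        have h' := List.countP_eq_length.2 (fun x hx => List.all_eq_true.1 h x hx)
        rw [h']; simp
    rw [show (fun k => if ((a :: rest).foldl countStep PySem.Dict.empty).getD k 0 ==
          ((a :: rest).length : Int) then (1 : Int) else 0) =
        ((fun v => if v == ((a :: rest).length : Int) then (1 : Int) else 0) ∘
          (fun k => ((a :: rest).foldl countStep PySem.Dict.empty).getD k 0)) from rfl] at hsum
    rw [hsum]
    -- now the A side
    set P : Char → Bool := fun c => (a :: rest).all (fun s => s.toList.contains c) with hP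
    have hperm :
        ((PySem.Set.ofList a.toList).filter (fun c => rest.all (fun s => s.toList.contains c))).Perm
          (((a :: rest).foldl countStep PySem.Dict.empty).keys.filter P) := by
      rw [(List.perm_ext_iff_of_nodup (List.Nodup.filter _ (PySem.Set.nodup_ofList _))
            (List.Nodup.filter _ hnodup))]
      intro c
      simp only [List.mem_filter, countsKeysMem, PySem.Dict.keys_empty, List.not_mem_nil,
        false_or, PySem.Set.mem_ofList, hP, List.all_cons, Bool.and_eq_true, List.all_eq_true]
      aesop
    have hlen :
        PySem.Set.len ((PySem.Set.ofList a.toList).filter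
            (fun c => rest.all (fun s => s.toList.contains c)))
          = (((a :: rest).foldl countStep PySem.Dict.empty).keys.countP P : Int) := by
      simp only [PySem.Set.len]
      rw [hperm.length_eq, List.countP_eq_length_filter]
    by_cases hrest : rest.length = 0
    · have hnil : rest = [] := List.eq_nil_of_length_eq_zero hrest
      subst hnil
      have h0 : ([] : List String).length = 0 := rfl
      rw [if_pos h0, ← hlen]
      simp
    · rw [if_neg hrest, interFold, hlen]
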